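-- pv_equiv track=rewrite | github.com/Sangioo/Ingegneria-Infomatica | Introduzione-alla-programmazione/Dispense/LabPython05/A_Ex1.py | A_Ex1
-- ===== SOURCE A (Python) =====
-- def A_Ex1(s,n):
--     if len(s)<n: return ''
--
--     maxS = ''
--     max = 0
--     for i in range(len(s)-n+1):
--         tmpS = ''
--         tmpM = 0
--         for j in range(n):
--             tmpS += s[i+j]
--             tmpM += ord(s[i+j])
--
--         if tmpM>max:
--             maxS = tmpS
--             max = tmpM
--
--     return maxS
-- ===== SOURCE B (Python) =====
-- def A_Ex1(s, n):
--     # Sliding-window running sum: O(len(s)) instead of A's O(len(s)*n).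
--     if n <= 0 or len(s) < n:
--         return ''
--     cur = sum(ord(c) for c in s[:n])
--     best, besti = cur, 0
--     for i in range(1, len(s) - n + 1):
--         cur = cur + ord(s[i + n - 1]) - ord(s[i - 1])
--         if cur > best:
--             best, besti = cur, i
--     return s[besti:besti + n]
-- ===== Notes on version B (the rewrite author's own statement) =====
-- stated objective: faster
-- what changed: Replaces the nested loop that rebuilds each length-n window and its ord-sum from scratch by a single sliding-window pass maintaining a running sum and the best start index, slicing the answer once at the end.
import Mathlib
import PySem

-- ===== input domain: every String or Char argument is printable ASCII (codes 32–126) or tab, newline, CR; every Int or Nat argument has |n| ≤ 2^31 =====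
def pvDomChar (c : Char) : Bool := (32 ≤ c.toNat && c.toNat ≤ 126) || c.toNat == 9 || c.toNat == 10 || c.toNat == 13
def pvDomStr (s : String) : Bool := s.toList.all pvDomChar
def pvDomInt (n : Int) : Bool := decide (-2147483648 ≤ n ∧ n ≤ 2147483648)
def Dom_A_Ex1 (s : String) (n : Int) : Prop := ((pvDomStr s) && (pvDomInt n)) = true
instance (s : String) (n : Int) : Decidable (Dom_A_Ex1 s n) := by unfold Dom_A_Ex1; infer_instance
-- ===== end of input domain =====

-- B replaces A's per-window rebuild of the substring and its ord-sum by one sliding-window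
-- pass with a running sum; objective: faster (asymptotic, O(len(s)) vs O(len(s)*n)).

-- ===== PORT A =====
def A_Ex1 (s : String) (n : Int) : String :=
  if (s.length : Int) < n then "" else
  let cs := s.toList
  let res := (PySem.List.pyRange 0 ((s.length : Int) - n + 1) 1).foldl
    (fun (st : List Char × Int) i =>
      let t := (PySem.List.pyRange 0 n 1).foldl
        (fun (t : List Char × Int) j =>
          -- s[i+j]; on every executed iteration the index is in range, so the none branch is unreachable
          match PySem.List.pyGet? cs (i + j) with
          | some c => (t.1 ++ [c], t.2 + (c.toNat : Int))
          | none => t) ([], 0)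
      if t.2 > st.2 then t else st) ([], 0)
  String.ofList res.1

-- ===== PORT B =====
-- ord(s[i]) for an in-range index (B only reads indices it knows are in range)
def pvOrdAt (cs : List Char) (i : Int) : Int :=
  PySem.List.pyGetD (cs.map (fun c => (c.toNat : Int))) i 0

def A_Ex1_alt (s : String) (n : Int) : String :=
  if n ≤ 0 ∨ (s.length : Int) < n then "" else
  let cs := s.toList
  let cur0 : Int := ((PySem.List.slice cs none (some n)).map (fun c => (c.toNat : Int))).sum
  let st := (PySem.List.pyRange 1 ((s.length : Int) - n + 1) 1).foldl
    (fun (st : Int × Int × Int) i =>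
      let cur := st.1 + pvOrdAt cs (i + n - 1) - pvOrdAt cs (i - 1)
      if cur > st.2.1 then (cur, cur, i) else (cur, st.2.1, st.2.2))
    (cur0, cur0, 0)
  String.ofList (PySem.List.slice cs (some st.2.2) (some (st.2.2 + n)))

-- ===== PRECONDITION & SPEC =====
def Spec_A_Ex1 (s : String) (n : Int) (out : String) : Prop := out = A_Ex1_alt s n
instance (s : String) (n : Int) (out : String) : Decidable (Spec_A_Ex1 s n out) := by unfold Spec_A_Ex1; infer_instance

-- ===== CLAIM (what is proved, stated in full; the proofs are below) =====
def Claim_equal_A_Ex1 : Prop := ∀ (s : String) (n : Int), Dom_A_Ex1 s n → Spec_A_Ex1 s n (A_Ex1 s n)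

-- ===== LEMMAS AND PROOFS =====
-- window ord-sum: sum of character codes of the length-N window of cs starting at i
def pvWsum (cs : List Char) (i N : Nat) : Int :=
  (((cs.drop i).take N).map (fun c => (c.toNat : Int))).sum

-- first index (among 0..m) attaining the strict maximum of f
def pvFam (f : Nat → Int) : Nat → Nat
  | 0 => 0
  | m+1 => if f (m+1) > f (pvFam f m) then m+1 else pvFam f m

lemma pvFoldConst {α β : Type} (g : α → β → α) (a : α) (h : ∀ x, g a x = a) :
    ∀ l : List β, l.foldl g a = a := by
  intro l; induction l with
  | nil => rfl
  | cons x xs ih => simpa [List.foldl_cons, h x] using ih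

lemma pvSumLen (l : List Int) (h : ∀ x ∈ l, 1 ≤ x) : (l.length : Int) ≤ l.sum := by
  induction l with
  | nil => simp
  | cons x xs ih =>
    have hx := h x (by simp)
    have := ih (fun y hy => h y (by simp [hy]))
    simp only [List.length_cons, List.sum_cons]
    push_cast; omega

lemma pvWsum_pos (cs : List Char) (i N : Nat) (hN : 1 ≤ N) (h : i + N ≤ cs.length)
    (hc : ∀ c ∈ cs, (1 : Int) ≤ c.toNat) : 1 ≤ pvWsum cs i N := by
  unfold pvWsum
  have hlen : (((cs.drop i).take N).map (fun c => (c.toNat : Int))).length = N := by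
    simp; omega
  have := pvSumLen (((cs.drop i).take N).map (fun c => (c.toNat : Int))) (by
    intro x hx
    simp only [List.mem_map] at hx
    obtain ⟨c, hcmem, rfl⟩ := hx
    exact hc c (List.mem_of_mem_drop (List.mem_of_mem_take hcmem)))
  rw [hlen] at this
  omega

-- A's inner loop builds the window and its ord-sum
lemma pvInnerA (cs : List Char) (N i : Nat) (h : i + N ≤ cs.length) :
    (PySem.List.pyRange 0 (N:Int) 1).foldl
      (fun (t : List Char × Int) j =>
        match PySem.List.pyGet? cs ((i:Int) + j) with
        | some c => (t.1 ++ [c], t.2 + (c.toNat : Int))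
        | none => t) ([], 0)
    = ((cs.drop i).take N, pvWsum cs i N) := by
  induction N with
  | zero => simp [PySem.List.pyRange_one_eq_nil, pvWsum]
  | succ M ih =>
    have h1 : i + M ≤ cs.length := by omega
    have hiM : i + M < cs.length := by omega
    have hc : ((M+1 : Nat) : Int) = (M:Int) + 1 := by push_cast; ring
    rw [hc, PySem.List.pyRange_one_succ_right (by positivity), List.foldl_append, ih h1]
    have hidx : (i:Int) + (M:Int) = ((i + M : Nat) : Int) := by push_cast; ring
    have hget : PySem.List.pyGet? cs ((i:Int) + (M:Int)) = some (cs[i+M]'hiM) := by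
      rw [hidx, PySem.List.pyGet?_natCast, List.getElem?_eq_getElem hiM]
    have hdM : M < (cs.drop i).length := by simp; omega
    have htake : (cs.drop i).take (M+1) = (cs.drop i).take M ++ [cs[i+M]'hiM] := by
      rw [List.take_add_one, List.getElem?_eq_getElem hdM]
      simp [List.getElem_drop]
    have hsum : pvWsum cs i (M+1) = pvWsum cs i M + ((cs[i+M]'hiM).toNat : Int) := by
      unfold pvWsum
      rw [htake]; simp
    simp [List.foldl_cons, hget, htake, hsum]

-- A's outer loop keeps the first window of maximal ord-sum
lemma pvOuterA (cs : List Char) (N : Nat) (hN : 1 ≤ N)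
    (hc : ∀ c ∈ cs, (1 : Int) ≤ c.toNat) :
    ∀ k : Nat, k + 1 + N ≤ cs.length + 1 →
    (PySem.List.pyRange 0 ((k+1 : Nat) : Int) 1).foldl
      (fun (st : List Char × Int) i =>
        if ((PySem.List.pyRange 0 (N:Int) 1).foldl
          (fun (t : List Char × Int) j =>
            match PySem.List.pyGet? cs (i + j) with
            | some c => (t.1 ++ [c], t.2 + (c.toNat : Int))
            | none => t) ([], 0)).2 > st.2
        then (PySem.List.pyRange 0 (N:Int) 1).foldl
          (fun (t : List Char × Int) j =>
            match PySem.List.pyGet? cs (i + j) with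
            | some c => (t.1 ++ [c], t.2 + (c.toNat : Int))
            | none => t) ([], 0)
        else st) ([], 0)
    = ((cs.drop (pvFam (fun i => pvWsum cs i N) k)).take N,
        pvWsum cs (pvFam (fun i => pvWsum cs i N) k) N) := by
  intro k
  induction k with
  | zero =>
    intro hk
    have h0 : (0:Nat) + N ≤ cs.length := by omega
    have hpos := pvWsum_pos cs 0 N hN h0 hc
    have hin := pvInnerA cs N 0 h0
    simp only [Nat.cast_zero] at hin
    have h1 : ((1:Nat) : Int) = (0:Int) + 1 := by norm_num
    rw [h1, PySem.List.pyRange_one_singleton]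
    simp only [List.foldl_cons, List.foldl_nil, hin, pvFam]
    rw [if_pos (by omega)]
  | succ k ih =>
    intro hk
    have hk1 : k + 1 + N ≤ cs.length + 1 := by omega
    have hcast : ((k+2 : Nat) : Int) = ((k+1 : Nat) : Int) + 1 := by push_cast; ring
    rw [hcast, PySem.List.pyRange_one_succ_right (by positivity), List.foldl_append, ih hk1]
    have hwin : k + 1 + N ≤ cs.length := by omega
    have hin := pvInnerA cs N (k+1) hwin
    simp only [List.foldl_cons, List.foldl_nil, hin]
    have hfam : pvFam (fun i => pvWsum cs i N) (k+1)
        = if pvWsum cs (k+1) N > pvWsum cs (pvFam (fun i => pvWsum cs i N) k) N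
          then k+1 else pvFam (fun i => pvWsum cs i N) k := rfl
    rw [hfam]
    split_ifs with h <;> rfl

lemma pvOrdAt_nat (cs : List Char) (j : Nat) (h : j < cs.length) :
    pvOrdAt cs (j : Int) = (((cs[j]'h).toNat : Int)) := by
  unfold pvOrdAt
  rw [PySem.List.pyGetD_natCast]
  have hj : j < (cs.map (fun c => (c.toNat : Int))).length := by simpa using h
  simp [List.getD_eq_getElem?_getD, List.getElem?_eq_getElem hj]

-- sliding-window step: the next window sum adds the entering code and drops the leaving one
lemma pvSlide (cs : List Char) (N i : Nat) (h : i + 1 + N ≤ cs.length) :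
    pvWsum cs (i+1) N
      = pvWsum cs i N + (((cs[i+N]'(by omega)).toNat : Int)) - (((cs[i]'(by omega)).toNat : Int)) := by
  cases N with
  | zero => simp [pvWsum]
  | succ M =>
    have hi : i < cs.length := by omega
    have hiM : i + 1 + M < cs.length := by omega
    have hA : pvWsum cs i (M+1) = ((cs[i]'hi).toNat : Int) + pvWsum cs (i+1) M := by
      unfold pvWsum
      rw [List.drop_eq_getElem_cons hi, List.take_succ_cons]
      simp
    have hdM : M < (cs.drop (i+1)).length := by simp; omega
    have hB : pvWsum cs (i+1) (M+1) = pvWsum cs (i+1) M + ((cs[i+1+M]'hiM).toNat : Int) := by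
      unfold pvWsum
      rw [List.take_add_one, List.getElem?_eq_getElem hdM]
      simp [List.getElem_drop]
    have hidx : i + (M+1) = i + 1 + M := by omega
    have hg : (cs[i + (M+1)]'(by omega)) = cs[i+1+M]'hiM := by simp [hidx]
    rw [hg, hB, hA]
    omega

-- B's loop: running sum = current window sum; best pair = first argmax so far
lemma pvOuterB (cs : List Char) (N : Nat) (hN : 1 ≤ N) :
    ∀ k : Nat, k + 1 + N ≤ cs.length + 1 →
    (PySem.List.pyRange 1 ((k+1 : Nat) : Int) 1).foldl
      (fun (st : Int × Int × Int) i =>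
        if st.1 + pvOrdAt cs (i + (N:Int) - 1) - pvOrdAt cs (i - 1) > st.2.1
        then (st.1 + pvOrdAt cs (i + (N:Int) - 1) - pvOrdAt cs (i - 1),
              st.1 + pvOrdAt cs (i + (N:Int) - 1) - pvOrdAt cs (i - 1), i)
        else (st.1 + pvOrdAt cs (i + (N:Int) - 1) - pvOrdAt cs (i - 1), st.2.1, st.2.2))
      (pvWsum cs 0 N, pvWsum cs 0 N, 0)
    = (pvWsum cs k N, pvWsum cs (pvFam (fun i => pvWsum cs i N) k) N,
        ((pvFam (fun i => pvWsum cs i N) k : Nat) : Int)) := by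
  intro k
  induction k with
  | zero =>
    intro hk
    rw [PySem.List.pyRange_one_eq_nil (by norm_num), List.foldl_nil]
    simp [pvFam]
  | succ k ih =>
    intro hk
    have hk1 : k + 1 + N ≤ cs.length + 1 := by omega
    have hcast : ((k+2 : Nat) : Int) = ((k+1 : Nat) : Int) + 1 := by push_cast; ring
    rw [hcast, PySem.List.pyRange_one_succ_right (by push_cast; omega), List.foldl_append, ih hk1]
    simp only [List.foldl_cons, List.foldl_nil]
    have hkN : k + N < cs.length := by omega
    have hkL : k < cs.length := by omega
    have he1 : ((k+1 : Nat) : Int) + (N:Int) - 1 = ((k + N : Nat) : Int) := by push_cast; ring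
    have he2 : ((k+1 : Nat) : Int) - 1 = ((k : Nat) : Int) := by push_cast; ring
    have hcur : pvWsum cs k N + pvOrdAt cs (((k+1 : Nat) : Int) + (N:Int) - 1)
        - pvOrdAt cs (((k+1 : Nat) : Int) - 1) = pvWsum cs (k+1) N := by
      rw [he1, he2, pvOrdAt_nat cs (k+N) hkN, pvOrdAt_nat cs k hkL, pvSlide cs N k (by omega)]
    simp only [hcur]
    have hfam : pvFam (fun i => pvWsum cs i N) (k+1)
        = if pvWsum cs (k+1) N > pvWsum cs (pvFam (fun i => pvWsum cs i N) k) N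
          then k+1 else pvFam (fun i => pvWsum cs i N) k := rfl
    rw [hfam]
    split_ifs with h <;> simp

-- ===== VERDICT (by name: the statement is the Claim_ definition above) =====
theorem A_Ex1_spec : Claim_equal_A_Ex1 := by
  intro s n hdom
  unfold Spec_A_Ex1 A_Ex1 A_Ex1_alt
  simp only []
  by_cases hlt : (s.length : Int) < n
  · rw [if_pos hlt, if_pos (Or.inr hlt)]
  · rw [if_neg hlt]
    by_cases hn : n ≤ 0
    · rw [if_pos (Or.inl hn)]
      have hinner : PySem.List.pyRange 0 n 1 = [] := PySem.List.pyRange_one_eq_nil (by omega)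
      simp only [hinner, List.foldl_nil]
      rw [pvFoldConst _ _ (fun x => by simp)]
    · rw [if_neg (not_or.mpr ⟨hn, hlt⟩)]
      -- main case: 1 ≤ n ≤ len(s)
      have hc : ∀ c ∈ s.toList, (1 : Int) ≤ c.toNat := by
        intro c hmem
        have hs : s.toList.all pvDomChar = true := by
          simp only [Dom_A_Ex1, pvDomStr, Bool.and_eq_true] at hdom
          exact hdom.1
        have := (List.all_eq_true.mp hs) c hmem
        unfold pvDomChar at this
        simp only [Bool.or_eq_true, Bool.and_eq_true, decide_eq_true_eq, beq_iff_eq] at this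
        omega
      have hlen : s.toList.length = s.length := by simp
      set N := n.toNat with hNdef
      have hNn : (N : Int) = n := Int.toNat_of_nonneg (by omega)
      have hN1 : 1 ≤ N := by omega
      have hNL : N ≤ s.toList.length := by omega
      set k := s.toList.length - N with hkdef
      have hbound : (s.length : Int) - n + 1 = ((k+1 : Nat) : Int) := by push_cast; omega
      have hrangeN : PySem.List.pyRange 0 n 1 = PySem.List.pyRange 0 (N:Int) 1 := by rw [hNn]
      rw [hbound, hrangeN]
      rw [pvOuterA s.toList N hN1 hc k (by omega)]
      have hcur0 : ((PySem.List.slice s.toList none (some n)).map (fun c => (c.toNat : Int))).sum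
          = pvWsum s.toList 0 N := by
        rw [PySem.List.slice_to s.toList (show (0:Int) ≤ n by omega)]
        simp only [pvWsum, List.drop_zero]
        rw [hNdef]
      rw [hcur0]
      rw [show n = (N:Int) from hNn.symm]
      rw [pvOuterB s.toList N hN1 k (by omega)]
      have hsl : PySem.List.slice s.toList
            (some ((pvFam (fun i => pvWsum s.toList i N) k : Nat) : Int))
            (some (((pvFam (fun i => pvWsum s.toList i N) k : Nat) : Int) + (N:Int)))
          = (s.toList.drop (pvFam (fun i => pvWsum s.toList i N) k)).take N := by
        rw [PySem.List.slice_natCast_add]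
      rw [hsl]
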